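-- pv_equiv track=rewrite | github.com/AbuAzad2025/AzadAccounting-sys | AI/engine/ai_training_engine.py | _find_class_end
-- ===== SOURCE A (Python) =====
-- def _find_class_end(content: str, start: int) -> int:
--     """العثور على نهاية الـ class"""
--     indent_level = 0
--     for i in range(start, len(content)):
--         if content[i] == '\n':
--             line = content[i:content.find('\n', i+1) if content.find('\n', i+1) != -1 else len(content)]
--
--             if line.strip() and not line.strip().startswith(' ') and not line.strip().startswith('\t'):
--                 if not line.strip().startswith('class '):
--                     return i
--     return len(content)
-- ===== SOURCE B (Python) =====
-- def _find_class_end(content: str, start: int) -> int: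
--     parts = content.split('\n')
--     offset = len(parts[0]) + 1
--     for part in parts[1:]:
--         sep = offset - 1  # index of the '\n' preceding this part
--         if sep >= start:
--             s = part.strip()
--             if s and not s.startswith(' ') and not s.startswith('\t') and not s.startswith('class '):
--                 return sep
--         offset += len(part) + 1
--     return len(content)
-- ===== Notes on version B (the rewrite author's own statement) =====
-- stated objective: faster
-- what changed: A scans the text character by character and, at every newline, calls str.find and slices out the following line; B splits the content on '\n' once and walks the resulting parts with a running offset, so no per-newline find/slice remains.
-- outside the precondition, e.g. on _find_class_end('a\nb\n', -3): A returns -3, B returns 1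
import Mathlib
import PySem

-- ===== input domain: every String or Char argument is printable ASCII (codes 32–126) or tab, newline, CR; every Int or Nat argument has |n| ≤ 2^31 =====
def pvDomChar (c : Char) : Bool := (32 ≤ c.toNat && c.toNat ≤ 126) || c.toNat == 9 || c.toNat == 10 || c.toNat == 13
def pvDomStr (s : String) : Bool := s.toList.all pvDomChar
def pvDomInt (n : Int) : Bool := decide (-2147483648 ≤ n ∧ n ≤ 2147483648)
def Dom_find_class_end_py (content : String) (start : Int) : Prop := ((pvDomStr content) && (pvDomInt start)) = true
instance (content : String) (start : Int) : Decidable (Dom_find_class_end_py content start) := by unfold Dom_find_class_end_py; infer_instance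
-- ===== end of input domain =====

-- B replaces A's char-by-char scan (a str.find and a slice at every newline) by one split('\n')
-- walked with a running offset; equivalence is claimed for start ≥ 0 (see Pre_ below).

-- ===== PORT A =====
-- the for-loop over range(start, len(content)) with early return, as recursion over the index list
def aLoop (cs : List Char) (n : Int) : List Int → Int
  | [] => n
  | i :: rest =>
    if PySem.List.pyGet? cs i = some '\n' then
      let fnd := PySem.Chars.findFrom cs ['\n'] (i + 1)
      let line := PySem.List.slice cs (some i) (some (if fnd ≠ -1 then fnd else n))
      let st := PySem.Chars.strip line
      if st ≠ [] ∧ PySem.Chars.startswith st [' '] = false ∧ PySem.Chars.startswith st ['\t'] = false then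
        if PySem.Chars.startswith st ['c', 'l', 'a', 's', 's', ' '] = false then i
        else aLoop cs n rest
      else aLoop cs n rest
    else aLoop cs n rest

def find_class_end_py (content : String) (start : Int) : Int :=
  aLoop content.toList (content.toList.length : Int)
    (PySem.List.pyRange start (content.toList.length : Int))

-- ===== PORT B =====
-- content.split('\n') for the single-character separator '\n'
def splitNL : List Char → List (List Char)
  | [] => [[]]
  | c :: t =>
    if c = '\n' then [] :: splitNL t
    else
      match splitNL t with
      | [] => [[c]]
      | p :: ps => (c :: p) :: ps

-- the for-loop over parts[1:] with the running offset
def bLoop (start : Int) : Int → List (List Char) → Option Int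
  | _, [] => none
  | offset, part :: rest =>
    if offset - 1 ≥ start ∧
        (let s := PySem.Chars.strip part
         s ≠ [] ∧ PySem.Chars.startswith s [' '] = false ∧ PySem.Chars.startswith s ['\t'] = false ∧
           PySem.Chars.startswith s ['c', 'l', 'a', 's', 's', ' '] = false) then
      some (offset - 1)
    else bLoop start (offset + part.length + 1) rest

def find_class_end_py_alt (content : String) (start : Int) : Int :=
  let cs := content.toList
  match splitNL cs with
  | [] => (cs.length : Int)
  | p0 :: rest =>
    match bLoop start (p0.length + 1) rest with
    | some r => r
    | none => (cs.length : Int)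

-- ===== PRECONDITION & SPEC =====
-- Pre_ excludes negative start: a start index into the source text is naturally non-negative; for
-- start < -len(content) A raises IndexError, and for -len(content) ≤ start < 0 A scans through
-- Python's negative-index wraparound and can even return a negative index (see the claim's cites).
def Pre_find_class_end_py (_content : String) (start : Int) : Prop := 0 ≤ start
instance (content : String) (start : Int) : Decidable (Pre_find_class_end_py content start) := by
  unfold Pre_find_class_end_py; infer_instance

def pvWitness_find_class_end_py : String × Int := ("class A:\n    x = 1\nend\n", 0)

def Spec_find_class_end_py (content : String) (start : Int) (out : Int) : Prop := out = find_class_end_py_alt content start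
instance (content : String) (start : Int) (out : Int) : Decidable (Spec_find_class_end_py content start out) := by unfold Spec_find_class_end_py; infer_instance

-- ===== CLAIM (what is proved, stated in full; the proofs are below) =====
def Claim_equal_find_class_end_py : Prop := ∀ (content : String) (start : Int), Dom_find_class_end_py content start → Pre_find_class_end_py content start → Spec_find_class_end_py content start (find_class_end_py content start)

-- ===== LEMMAS AND PROOFS =====

theorem strip_cons_nl (x : List Char) : PySem.Chars.strip ('\n' :: x) = PySem.Chars.strip x := by
  simp [PySem.Chars.strip, PySem.Chars.lstrip, show PySem.Chars.isspace '\n' = true from rfl]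

theorem singleton_prefix_drop (u : List Char) (c : Char) (m : Nat) :
    [c] <+: u.drop m ↔ u[m]? = some c := by
  rw [← List.head?_drop]
  cases h : u.drop m with
  | nil => simp
  | cons a t => simp [List.cons_prefix_cons, eq_comm]

theorem takeWhile_of_first (u : List Char) (c : Char) : ∀ (m : Nat), u[m]? = some c →
    (∀ j < m, u[j]? ≠ some c) → u.takeWhile (· ≠ c) = u.take m := by
  induction u with
  | nil => intro m h; simp at h
  | cons a t ih =>
    intro m h hj
    cases m with
    | zero => simp at h; subst h; simp [List.takeWhile]
    | succ m =>
      have ha : a ≠ c := by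
        have := hj 0 (Nat.succ_pos m); simpa using this
      simp only [List.getElem?_cons_succ] at h
      rw [List.take_succ_cons, List.takeWhile_cons, if_pos (by simpa using ha),
        ih m h (fun j hjm => by simpa using hj (j+1) (by omega))]

theorem singleton_infix_mem (u : List Char) (c : Char) : [c] <:+: u ↔ c ∈ u := by
  rw [← PySem.Chars.isIn_iff_infix, ← PySem.Chars.exists_prefix_drop_iff_isIn]
  constructor
  · rintro ⟨j, hj⟩
    exact List.mem_of_getElem? ((singleton_prefix_drop u c j).mp hj)
  · intro h
    obtain ⟨j, hj, he⟩ := List.mem_iff_getElem.mp h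
    exact ⟨j, (singleton_prefix_drop u c j).mpr (by simp [List.getElem?_eq_getElem hj, he])⟩

-- A's line, sliced at a newline up to str.find's next newline (or the end), strips to the same
-- string as the plain text segment between the two newlines.
theorem line_strip (cs : List Char) (i : Nat) (hc : cs[i]? = some '\n') :
    PySem.Chars.strip (PySem.List.slice cs (some (i : Int))
      (some (if PySem.Chars.findFrom cs ['\n'] ((i : Int) + 1) ≠ -1
             then PySem.Chars.findFrom cs ['\n'] ((i : Int) + 1) else (cs.length : Int)))) =
    PySem.Chars.strip ((cs.drop (i+1)).takeWhile (· ≠ '\n')) := by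
  have hi : i < cs.length := (List.getElem?_eq_some_iff.mp hc).1
  have hci : cs[i] = '\n' := by
    have := List.getElem?_eq_getElem hi; rw [this] at hc; simpa using hc
  have hcast : (i : Int) + 1 = ((i + 1 : Nat) : Int) := by push_cast; ring
  rw [hcast, PySem.Chars.findFrom_natCast cs ['\n'] (i+1) (by omega)]
  set u := cs.drop (i+1) with hu
  have hdropi : cs.drop i = '\n' :: u := by
    rw [List.drop_eq_getElem_cons hi, hci]
  by_cases hmem : '\n' ∈ u
  · have hf0 : 0 ≤ PySem.Chars.find u ['\n'] :=
      (PySem.Chars.find_nonneg_iff u ['\n']).mpr ((singleton_infix_mem u '\n').mpr hmem)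
    set m := (PySem.Chars.find u ['\n']).toNat with hm
    have hfm : PySem.Chars.find u ['\n'] = (m : Int) := by omega
    have hspec := PySem.Chars.find_spec (s := u) (sub := ['\n']) hf0
    have hum : u[m]? = some '\n' := (singleton_prefix_drop u '\n' m).mp hspec.1
    have hne : ¬ PySem.Chars.find u ['\n'] = -1 := by omega
    rw [if_neg hne,
      if_pos (show ((i+1:Nat):Int) + PySem.Chars.find u ['\n'] ≠ -1 by rw [hfm]; push_cast; omega)]
    have h2 : ((i + 1 : Nat) : Int) + PySem.Chars.find u ['\n'] = ((i + 1 + m : Nat) : Int) := by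
      rw [hfm]; push_cast; ring
    rw [h2, PySem.List.slice_natCast cs i (i+1+m)]
    have h3 : i + 1 + m - i = m + 1 := by omega
    rw [h3, hdropi, List.take_succ_cons, strip_cons_nl,
      takeWhile_of_first u '\n' m hum
        (fun j hj hje => hspec.2 j (by omega) ((singleton_prefix_drop u '\n' j).mpr hje))]
  · have hf : PySem.Chars.find u ['\n'] = -1 :=
      (PySem.Chars.find_eq_neg_one_iff u ['\n']).mpr (fun h => hmem ((singleton_infix_mem u '\n').mp h))
    rw [if_pos hf, if_neg (by simp)]
    have hlen : (cs.length : Int) = ((cs.length : Nat) : Int) := rfl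
    rw [hlen, PySem.List.slice_natCast cs i cs.length]
    rw [List.take_of_length_le (by simp), hdropi, strip_cons_nl,
      List.takeWhile_eq_self_iff.mpr (fun x hx => by simp; rintro rfl; exact hmem hx)]

theorem aLoop_skip (cs : List Char) (n : Int) :
    ∀ (l1 l2 : List Int), (∀ i ∈ l1, PySem.List.pyGet? cs i ≠ some '\n') →
    aLoop cs n (l1 ++ l2) = aLoop cs n l2 := by
  intro l1
  induction l1 with
  | nil => intro l2 _; rfl
  | cons i r ih =>
    intro l2 h
    rw [List.cons_append, aLoop, if_neg (h i (by simp)), ih l2 (fun j hj => h j (by simp [hj]))]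

-- scanning cs = p ++ '\n' :: t from an index past the first newline is the scan of t, shifted
theorem aLoop_shift (p t cs : List Char) (hcs : cs = p ++ '\n' :: t) :
    ∀ (d j : Nat), t.length - j ≤ d →
    aLoop cs (cs.length : Int) (PySem.List.pyRange ((p.length + 1 + j : Nat) : Int) (cs.length : Int)) =
      ((p.length + 1 : Nat) : Int) + aLoop t (t.length : Int) (PySem.List.pyRange (j : Int) (t.length : Int)) := by
  have hlen : cs.length = p.length + 1 + t.length := by subst hcs; simp; omega
  intro d
  induction d with
  | zero =>
    intro j hj
    have hj' : t.length ≤ j := by omega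
    rw [PySem.List.pyRange_one_eq_nil (by omega),
        PySem.List.pyRange_one_eq_nil (by omega)]
    rw [aLoop, aLoop, hlen]; push_cast; ring
  | succ d ihd =>
    intro j hj
    by_cases hjt : t.length ≤ j
    · rw [PySem.List.pyRange_one_eq_nil (by omega),
          PySem.List.pyRange_one_eq_nil (by omega)]
      rw [aLoop, aLoop, hlen]; push_cast; ring
    · have hjlt : j < t.length := by omega
      rw [PySem.List.pyRange_one_cons (by push_cast; omega),
          PySem.List.pyRange_one_cons (a := (j : Int)) (by omega)]
      have hgetc : PySem.List.pyGet? cs ((p.length + 1 + j : Nat) : Int) = t[j]? := by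
        rw [PySem.List.pyGet?_of_nonneg cs (by positivity)]
        simp only [Int.toNat_natCast]
        subst hcs
        rw [List.getElem?_append_right (by omega)]
        have : p.length + 1 + j - p.length = j + 1 := by omega
        simp [this]
      have hgett : PySem.List.pyGet? t ((j : Nat) : Int) = t[j]? := by
        rw [PySem.List.pyGet?_of_nonneg t (by positivity)]
        simp
      have htj : t[j]? = some t[j] := List.getElem?_eq_getElem hjlt
      by_cases hnl : t[j] = '\n'
      · have hcj : cs[(p.length + 1 + j : Nat)]? = some '\n' := by
          subst hcs
          rw [List.getElem?_append_right (by omega)]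
          have : p.length + 1 + j - p.length = j + 1 := by omega
          simp [this, htj, hnl]
        have htj' : t[j]? = some '\n' := by rw [htj, hnl]
        have hl1 := line_strip cs (p.length + 1 + j) hcj
        have hl2 := line_strip t j htj'
        have hdrop : cs.drop (p.length + 1 + j + 1) = t.drop (j + 1) := by
          subst hcs
          rw [show p.length + 1 + j + 1 = p.length + (j + 1 + 1) by omega, ← List.drop_drop,
            List.drop_left, List.drop_succ_cons]
        rw [hdrop] at hl1
        have hcond1 : PySem.List.pyGet? cs ((p.length + 1 + j : Nat) : Int) = some '\n' := by
          rw [hgetc, htj, hnl]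
        have hcond2 : PySem.List.pyGet? t ((j : Nat) : Int) = some '\n' := by
          rw [hgett, htj, hnl]
        rw [aLoop, aLoop, if_pos hcond1, if_pos hcond2]
        simp only [hl1, hl2]
        have hIH := ihd (j + 1) (by omega)
        have hc1 : ((p.length + 1 + j : Nat) : Int) + 1 = ((p.length + 1 + (j + 1) : Nat) : Int) := by push_cast; ring
        have hc2 : ((j : Nat) : Int) + 1 = ((j + 1 : Nat) : Int) := by push_cast; ring
        rw [hc1, hc2] at *
        set st := PySem.Chars.strip ((t.drop (j+1)).takeWhile (· ≠ '\n')) with hst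
        by_cases h1 : st ≠ [] ∧ PySem.Chars.startswith st [' '] = false ∧ PySem.Chars.startswith st ['\t'] = false
        · rw [if_pos h1, if_pos h1]
          by_cases h2 : PySem.Chars.startswith st ['c', 'l', 'a', 's', 's', ' '] = false
          · rw [if_pos h2, if_pos h2]; push_cast; ring
          · rw [if_neg h2, if_neg h2, hIH]
        · rw [if_neg h1, if_neg h1, hIH]
      · have hcond1 : ¬ PySem.List.pyGet? cs ((p.length + 1 + j : Nat) : Int) = some '\n' := by
          rw [hgetc, htj]; simp [hnl]
        have hcond2 : ¬ PySem.List.pyGet? t ((j : Nat) : Int) = some '\n' := by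
          rw [hgett, htj]; simp [hnl]
        rw [aLoop, aLoop, if_neg hcond1, if_neg hcond2]
        have hc1 : ((p.length + 1 + j : Nat) : Int) + 1 = ((p.length + 1 + (j + 1) : Nat) : Int) := by push_cast; ring
        have hc2 : ((j : Nat) : Int) + 1 = ((j + 1 : Nat) : Int) := by push_cast; ring
        rw [hc1, hc2, ihd (j + 1) (by omega)]

theorem splitNL_no_nl : ∀ cs : List Char, '\n' ∉ cs → splitNL cs = [cs] := by
  intro cs h
  induction cs with
  | nil => rfl
  | cons c t ih =>
    simp only [List.mem_cons, not_or] at h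
    rw [splitNL, if_neg (fun hc => h.1 hc.symm), ih h.2]

theorem splitNL_append : ∀ (p t : List Char), '\n' ∉ p →
    splitNL (p ++ '\n' :: t) = p :: splitNL t := by
  intro p t hp
  induction p with
  | nil => simp [splitNL]
  | cons c q ih =>
    simp only [List.mem_cons, not_or] at hp
    rw [List.cons_append, splitNL, if_neg (Ne.symm hp.1), ih hp.2]

theorem splitNL_head : ∀ t : List Char, ∃ r, splitNL t = t.takeWhile (· ≠ '\n') :: r := by
  intro t
  induction t with
  | nil => exact ⟨[], rfl⟩
  | cons c t ih =>
    obtain ⟨r, hr⟩ := ih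
    by_cases hc : c = '\n'
    · subst hc; exact ⟨splitNL t, by rw [splitNL, if_pos rfl]; simp [List.takeWhile]⟩
    · refine ⟨r, ?_⟩
      rw [splitNL, if_neg hc, hr]
      simp [hc]

theorem bLoop_shift : ∀ (parts : List (List Char)) (s c d : Int),
    bLoop (s + d) (c + d) parts = (bLoop s c parts).map (· + d) := by
  intro parts
  induction parts with
  | nil => intro s c d; rfl
  | cons p rest ih =>
    intro s c d
    rw [bLoop, bLoop]
    by_cases h : c - 1 ≥ s ∧
        (let s' := PySem.Chars.strip p
         s' ≠ [] ∧ PySem.Chars.startswith s' [' '] = false ∧ PySem.Chars.startswith s' ['\t'] = false ∧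
           PySem.Chars.startswith s' ['c', 'l', 'a', 's', 's', ' '] = false)
    · rw [if_pos ⟨by omega, h.2⟩, if_pos h]
      simp; omega
    · have h' : ¬ (c + d - 1 ≥ s + d ∧ _) := fun hh => h ⟨by omega, hh.2⟩
      rw [if_neg h', if_neg h]
      have : c + d + ↑p.length + 1 = (c + ↑p.length + 1) + d := by ring
      rw [this, ih]

theorem bLoop_nonpos : ∀ (parts : List (List Char)) (c : Int), 1 ≤ c → ∀ s : Int, s ≤ 0 →
    bLoop s c parts = bLoop 0 c parts := by
  intro parts
  induction parts with
  | nil => intros; rfl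
  | cons p rest ih =>
    intro c hc s hs
    rw [bLoop, bLoop]
    by_cases hq :
        (let s' := PySem.Chars.strip p
         s' ≠ [] ∧ PySem.Chars.startswith s' [' '] = false ∧ PySem.Chars.startswith s' ['\t'] = false ∧
           PySem.Chars.startswith s' ['c', 'l', 'a', 's', 's', ' '] = false)
    · rw [if_pos ⟨by omega, hq⟩, if_pos ⟨by omega, hq⟩]
    · rw [if_neg (fun h => hq h.2), if_neg (fun h => hq h.2),
        ih (c + p.length + 1) (by have := Int.natCast_nonneg p.length; omega) s hs]

theorem pv_main_aux : ∀ (N : Nat) (cs : List Char), cs.length ≤ N → ∀ start : Int, 0 ≤ start →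
    aLoop cs (cs.length : Int) (PySem.List.pyRange start (cs.length : Int)) =
      (match splitNL cs with
        | [] => (cs.length : Int)
        | p0 :: rest =>
          match bLoop start (p0.length + 1) rest with
          | some r => r
          | none => (cs.length : Int)) := by
  intro N
  induction N with
  | zero =>
    intro cs hcs start hstart
    have hnil : cs = [] := List.eq_nil_of_length_eq_zero (by omega)
    subst hnil
    rw [PySem.List.pyRange_one_eq_nil (by simpa using hstart)]
    rfl
  | succ N ih =>
    intro cs hcslen start hstart
    by_cases hmem : '\n' ∈ cs
    · have hsplit := (List.takeWhile_append_dropWhile (p := fun x => decide (x ≠ '\n')) (l := cs)).symm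
      set p := cs.takeWhile (fun x => decide (x ≠ '\n')) with hpdef
      have hp : '\n' ∉ p := by
        intro h
        have := List.mem_takeWhile_imp h
        simp at this
      cases hD : cs.dropWhile (fun x => decide (x ≠ '\n')) with
      | nil =>
        exfalso
        rw [hD, List.append_nil] at hsplit
        exact hp (hsplit ▸ hmem)
      | cons c t =>
        have hc : c = '\n' := by
          have h := List.head_dropWhile_not (p := fun x => decide (x ≠ '\n')) (l := cs)
            (by rw [hD]; simp)
          simp only [hD, List.head_cons] at h
          simpa using h
        subst hc
        rw [hD] at hsplit
        have hlen2 : cs.length = p.length + 1 + t.length := by rw [hsplit]; simp; omega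
        have htlen : t.length ≤ N := by omega
        obtain ⟨r, hr⟩ := splitNL_head t
        have hBsplit : splitNL cs = p :: (t.takeWhile (· ≠ '\n') :: r) := by
          rw [hsplit, splitNL_append p t hp, hr]
        have hmatch : (match splitNL cs with
            | [] => (cs.length : Int)
            | p0 :: rest =>
              match bLoop start ((p0.length : Int) + 1) rest with
              | some r => r
              | none => (cs.length : Int)) =
            (match bLoop start ((p.length : Int) + 1) (t.takeWhile (· ≠ '\n') :: r) with
              | some x => x
              | none => (cs.length : Int)) := by
          rw [hBsplit]
        rw [hmatch]
        have hck : cs[p.length]? = some '\n' := by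
          rw [hsplit, List.getElem?_append_right (le_refl _)]
          simp
        have hdropk : cs.drop (p.length + 1) = t := by
          rw [hsplit, show p.length + 1 = p.length + (0 + 1) by omega, ← List.drop_drop,
            List.drop_left, List.drop_succ_cons, List.drop_zero]
        have hcondk : PySem.List.pyGet? cs ((p.length : Nat) : Int) = some '\n' := by
          rw [PySem.List.pyGet?_of_nonneg cs (by positivity)]
          simpa using hck
        have hlk := line_strip cs p.length hck
        rw [hdropk] at hlk
        have hshift0 := aLoop_shift p t cs hsplit t.length
        set st := PySem.Chars.strip (t.takeWhile (· ≠ '\n')) with hstdef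
        set nt := (t.length : Int) with hntdef
        have ihA : ∀ s' : Int, 0 ≤ s' →
            aLoop t nt (PySem.List.pyRange s' nt) =
              (match bLoop s' ((t.takeWhile (· ≠ '\n')).length + 1) r with
                | some x => x
                | none => nt) := by
          intro s' hs'
          have := ih t htlen s' hs'
          rw [hr] at this
          exact this
        by_cases hsk : start ≤ (p.length : Int)
        · have hrange : PySem.List.pyRange start (cs.length : Int) =
              PySem.List.pyRange start ((p.length : Nat) : Int) ++
                PySem.List.pyRange ((p.length : Nat) : Int) (cs.length : Int) :=
            PySem.List.pyRange_one_append start _ _ hsk (by omega)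
          have hskip1 : ∀ i ∈ PySem.List.pyRange start ((p.length : Nat) : Int),
              PySem.List.pyGet? cs i ≠ some '\n' := by
            intro i hi
            rw [PySem.List.mem_pyRange_one] at hi
            rw [PySem.List.pyGet?_of_nonneg cs (by omega)]
            rw [hsplit, List.getElem?_append_left (by omega)]
            intro h
            exact hp (List.mem_of_getElem? h)
          rw [hrange, aLoop_skip cs _ _ _ hskip1,
            PySem.List.pyRange_one_cons (by omega), aLoop, if_pos hcondk]
          simp only [hlk]
          have hshift := hshift0 0 (by omega)
          rw [show ((p.length + 1 + 0 : Nat) : Int) = ((p.length : Nat) : Int) + 1 by push_cast; ring] at hshift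
          rw [hshift]
          simp only [Nat.cast_zero]
          rw [ihA 0 (le_refl 0)]
          conv_rhs => rw [bLoop]
          have hoff : (p.length : Int) + 1 - 1 ≥ start := by omega
          have hbshift : bLoop start ((p.length : Int) + 1 + ((t.takeWhile (· ≠ '\n')).length : Int) + 1) r =
              (bLoop (start - ((p.length : Int) + 1)) (((t.takeWhile (· ≠ '\n')).length : Int) + 1) r).map
                (· + ((p.length : Int) + 1)) := by
            rw [← bLoop_shift]
            congr 1 <;> ring
          have hbz : bLoop (start - ((p.length : Int) + 1)) (((t.takeWhile (· ≠ '\n')).length : Int) + 1) r =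
              bLoop 0 (((t.takeWhile (· ≠ '\n')).length : Int) + 1) r := by
            refine bLoop_nonpos r _ (by omega) _ (by omega)
          by_cases h1 : st ≠ [] ∧ PySem.Chars.startswith st [' '] = false ∧
              PySem.Chars.startswith st ['\t'] = false
          · rw [if_pos h1]
            by_cases h2 : PySem.Chars.startswith st ['c', 'l', 'a', 's', 's', ' '] = false
            · rw [if_pos h2, if_pos ⟨hoff, h1.1, h1.2.1, h1.2.2, h2⟩]
              simp
            · rw [if_neg h2, if_neg (fun hh => h2 hh.2.2.2.2), hbshift, hbz]
              cases bLoop 0 (((t.takeWhile (· ≠ '\n')).length : Int) + 1) r with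
              | none => simp [hntdef]; omega
              | some x => simp; ring
          · rw [if_neg h1, if_neg (fun hh => h1 ⟨hh.2.1, hh.2.2.1, hh.2.2.2.1⟩), hbshift, hbz]
            cases bLoop 0 (((t.takeWhile (· ≠ '\n')).length : Int) + 1) r with
            | none => simp [hntdef]; omega
            | some x => simp; ring
        · 
          set j : Nat := (start - ((p.length : Int) + 1)).toNat with hjdef
          have hjeq : start = ((p.length + 1 + j : Nat) : Int) := by push_cast; omega
          have hshift := hshift0 j (by omega)
          rw [hjeq, hshift, ihA (j : Int) (by positivity)]
          have hBstep : bLoop ((p.length + 1 + j : Nat) : Int) ((p.length : Int) + 1)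
                (t.takeWhile (· ≠ '\n') :: r) =
              bLoop ((p.length + 1 + j : Nat) : Int)
                ((p.length : Int) + 1 + ((t.takeWhile (· ≠ '\n')).length : Int) + 1) r := by
            rw [bLoop, if_neg (fun hh => by have := hh.1; push_cast at this; omega)]
          rw [hBstep]
          have hbshift : bLoop ((p.length + 1 + j : Nat) : Int)
                ((p.length : Int) + 1 + ((t.takeWhile (· ≠ '\n')).length : Int) + 1) r =
              (bLoop (j : Int) (((t.takeWhile (· ≠ '\n')).length : Int) + 1) r).map
                (· + ((p.length : Int) + 1)) := by
            rw [← bLoop_shift]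
            congr 1 <;> push_cast <;> ring
          rw [hbshift]
          cases bLoop (j : Int) (((t.takeWhile (· ≠ '\n')).length : Int) + 1) r with
          | none => simp [hntdef]; omega
          | some x => simp; ring
    · have hskip : ∀ i ∈ PySem.List.pyRange start (cs.length : Int),
          PySem.List.pyGet? cs i ≠ some '\n' := by
        intro i hi
        rw [PySem.List.mem_pyRange_one] at hi
        rw [PySem.List.pyGet?_of_nonneg cs (by omega)]
        intro h
        exact hmem (List.mem_of_getElem? h)
      have h1 := aLoop_skip cs (cs.length : Int) _ [] hskip
      rw [List.append_nil] at h1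
      rw [h1, splitNL_no_nl cs hmem]
      rfl

-- ===== VERDICT (by name: the statement is the Claim_ definition above) =====
theorem find_class_end_py_spec : Claim_equal_find_class_end_py := by
  intro content start _ hpre
  unfold Spec_find_class_end_py find_class_end_py find_class_end_py_alt
  exact pv_main_aux content.toList.length content.toList (le_refl _) start hpre
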